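-- pv_equiv track=rewrite | github.com/TristanLe07/CaptureTheFlag | GameFrame/TextObject.py | split_half_on_space
-- ===== SOURCE A (Python) =====
-- def split_half_on_space(string):
--     """Try and split a string around the midpoint
--
--     Return 2 string on a space given it is at least 12 chars and the space is not near the edges of string.
--     """
--     if len(string) < 10:
--         return string, ""
--     half = len(string) // 2
--     split_location = 0
--     for i in range(half - 2):
--         if string[half + i] == " ":
--             split_location = half + i
--             break
--         if string[half - i] == " ":
--             split_location = half - i
--             break
--     if split_location == 0:
--         return string.strip(), ""
--
--     return string[:split_location].strip(), string[split_location:].strip()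
-- ===== SOURCE B (Python) =====
-- def split_half_on_space(string):
--     """Try and split a string around the midpoint
--
--     Return 2 string on a space given it is at least 12 chars and the space is not near the edges of string.
--     """
--     if len(string) < 10:
--         return string, ""
--     half = len(string) // 2
--     fwd = string.find(" ", half)
--     if fwd > 2 * half - 3:
--         fwd = -1
--     bwd = string.rfind(" ", 3, half + 1)
--     if fwd != -1 and (bwd == -1 or fwd - half <= half - bwd):
--         loc = fwd
--     elif bwd != -1:
--         loc = bwd
--     else:
--         return string.strip(), ""
--     return string[:loc].strip(), string[loc:].strip()
-- ===== Notes on version B (the rewrite author's own statement) =====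
-- stated objective: idiomatic
-- what changed: The interleaved character-by-character loop around the midpoint is replaced by two standard-library searches - str.find for the first space at or after the midpoint (discarded when past the window) and str.rfind for the last space at or before it - and the candidate closer to the midpoint is chosen, forward winning ties.
import Mathlib
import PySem

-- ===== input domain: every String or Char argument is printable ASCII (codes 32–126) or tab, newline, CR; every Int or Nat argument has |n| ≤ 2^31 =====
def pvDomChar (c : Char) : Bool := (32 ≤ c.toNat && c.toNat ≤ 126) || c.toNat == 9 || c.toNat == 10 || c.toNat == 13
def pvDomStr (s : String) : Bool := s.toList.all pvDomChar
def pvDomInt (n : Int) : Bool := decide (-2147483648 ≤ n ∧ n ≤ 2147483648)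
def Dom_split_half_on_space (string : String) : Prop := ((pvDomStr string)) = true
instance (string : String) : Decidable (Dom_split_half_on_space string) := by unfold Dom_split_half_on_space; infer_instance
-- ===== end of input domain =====

-- B replaces A's interleaved index loop by two library searches (find forward, rfind backward)
-- and picks the candidate closer to the midpoint (forward wins ties); same return value, proved equal.

-- ===== PORT A =====
-- the for-loop with break; indices half+i / half-i are always in range for len(string) ≥ 10,
-- so comparing the Option from pyGet? against `some ' '` is exact.
def splitLoopA (string : String) (half : Int) : List Int → Int
  | [] => 0
  | i :: rest =>
    if PySem.Str.pyGet? string (half + i) = some ' ' then half + i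
    else if PySem.Str.pyGet? string (half - i) = some ' ' then half - i
    else splitLoopA string half rest

def split_half_on_space (string : String) : String × String :=
  if PySem.Str.len string < 10 then (string, "")
  else
    let half := PySem.Int.floordiv (PySem.Str.len string) 2
    let split_location := splitLoopA string half (PySem.List.pyRange 0 (half - 2) 1)
    if split_location = 0 then (PySem.Str.strip string, "")
    else (PySem.Str.strip (PySem.Str.slice string none (some split_location)),
          PySem.Str.strip (PySem.Str.slice string (some split_location) none))

-- ===== PORT B =====
def split_half_on_space_alt (string : String) : String × String :=
  if PySem.Str.len string < 10 then (string, "")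
  else
    let half := PySem.Int.floordiv (PySem.Str.len string) 2
    let fwd0 := PySem.Str.findFrom string " " half
    let fwd := if fwd0 > 2 * half - 3 then -1 else fwd0
    let bwd := PySem.Str.rfindFrom string " " 3 (some (half + 1))
    if fwd ≠ -1 ∧ (bwd = -1 ∨ fwd - half ≤ half - bwd) then
      (PySem.Str.strip (PySem.Str.slice string none (some fwd)),
       PySem.Str.strip (PySem.Str.slice string (some fwd) none))
    else if bwd ≠ -1 then
      (PySem.Str.strip (PySem.Str.slice string none (some bwd)),
       PySem.Str.strip (PySem.Str.slice string (some bwd) none))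
    else (PySem.Str.strip string, "")

-- ===== PRECONDITION & SPEC =====
def Spec_split_half_on_space (string : String) (out : String × String) : Prop := out = split_half_on_space_alt string
instance (string : String) (out : String × String) : Decidable (Spec_split_half_on_space string out) := by unfold Spec_split_half_on_space; infer_instance

-- ===== CLAIM (what is proved, stated in full; the proofs are below) =====
def Claim_equal_split_half_on_space : Prop := ∀ (string : String), Dom_split_half_on_space string → Spec_split_half_on_space string (split_half_on_space string)

-- ===== LEMMAS AND PROOFS =====

-- a one-character string is a prefix of `cs.drop j` exactly when cs[j] is that character
lemma singleton_prefix_head? (l : List Char) (c : Char) :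
    [c] <+: l ↔ l.head? = some c := by
  cases l with
  | nil => simp
  | cons a t => simp [List.cons_prefix_cons, eq_comm]

lemma singleton_prefix_drop_iff (cs : List Char) (c : Char) (j : ℕ) :
    [c] <+: cs.drop j ↔ cs[j]? = some c := by
  rw [singleton_prefix_head?, List.head?_drop]

-- the A-loop over the mapped Nat range, rewritten as a Nat-indexed recursion
def selN (cs : List Char) (h : ℕ) : ℕ → ℕ → Int
  | _, 0 => 0
  | a, k+1 =>
    if cs[h+a]? = some ' ' then ((h+a : ℕ) : Int)
    else if cs[h-a]? = some ' ' then ((h-a : ℕ) : Int)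
    else selN cs h (a+1) k

lemma loop_eq_selN (string : String) (h : ℕ) :
    ∀ (k a : ℕ), a + k ≤ h →
    splitLoopA string (h : Int) ((List.range' a k).map Int.ofNat) =
      selN string.toList h a k := by
  intro k
  induction k with
  | zero => intro a _; simp [splitLoopA, selN]
  | succ k ih =>
    intro a hak
    have h1 : (h : Int) + (a : Int) = ((h + a : ℕ) : Int) := by push_cast; ring
    have h2 : (h : Int) - (a : Int) = ((h - a : ℕ) : Int) := by omega
    rw [List.range'_succ, List.map_cons]
    show (if PySem.Str.pyGet? string ((h : Int) + (a : Int)) = some ' ' then (h : Int) + (a : Int)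
      else if PySem.Str.pyGet? string ((h : Int) - (a : Int)) = some ' ' then (h : Int) - (a : Int)
      else splitLoopA string (h : Int) ((List.range' (a+1) k).map Int.ofNat)) = _
    rw [h1, h2, ih (a+1) (by omega)]
    simp only [PySem.Str.pyGet?_eq, PySem.Chars.pyGet?_eq_listPyGet?, PySem.List.pyGet?_natCast]
    simp only [selN]

lemma selN_skip (cs : List Char) (h : ℕ) :
    ∀ (j k a : ℕ),
      (∀ i, a ≤ i → i < a + j → cs[h+i]? ≠ some ' ' ∧ cs[h-i]? ≠ some ' ') →
      selN cs h a (j + k) = selN cs h (a + j) k := by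
  intro j
  induction j with
  | zero => intro k a _; simp
  | succ j ih =>
    intro k a hyp
    have ha := hyp a (le_refl a) (by omega)
    have hjk : j + 1 + k = (j + k) + 1 := by omega
    rw [hjk]
    show (if cs[h+a]? = some ' ' then ((h+a : ℕ) : Int)
      else if cs[h-a]? = some ' ' then ((h-a : ℕ) : Int)
      else selN cs h (a+1) (j+k)) = _
    rw [if_neg ha.1, if_neg ha.2, ih k (a+1) (fun i hi1 hi2 => hyp i (by omega) (by omega))]
    have : a + 1 + j = a + (j + 1) := by omega
    rw [this]

-- rfind.go t sub j is the largest index k ≤ j with sub a prefix of t.drop k, else -1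
lemma rfind_go_cases (t sub : List Char) :
    ∀ j : ℕ,
      (PySem.Chars.rfind.go t sub j = -1 ∧ ∀ k, k ≤ j → ¬ sub <+: t.drop k) ∨
      (∃ k : ℕ, PySem.Chars.rfind.go t sub j = (k : Int) ∧ k ≤ j ∧ sub <+: t.drop k ∧
        ∀ k', k < k' → k' ≤ j → ¬ sub <+: t.drop k') := by
  intro j
  induction j with
  | zero =>
    by_cases hp : sub.isPrefixOf t
    · right
      refine ⟨0, by simp [PySem.Chars.rfind.go, hp], le_refl 0,
        by simpa using List.isPrefixOf_iff_prefix.mp hp, ?_⟩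
      intro k' h1 h2; omega
    · left
      refine ⟨by simp [PySem.Chars.rfind.go, hp], ?_⟩
      intro k hk
      have hk0 : k = 0 := by omega
      subst hk0
      simpa [List.isPrefixOf_iff_prefix] using hp
  | succ j ih =>
    by_cases hp : sub.isPrefixOf (t.drop (j+1))
    · right
      refine ⟨j+1, by simp [PySem.Chars.rfind.go, hp], le_refl _,
        List.isPrefixOf_iff_prefix.mp hp, ?_⟩
      intro k' h1 h2; omega
    · rcases ih with ⟨hgo, hall⟩ | ⟨k, hgo, hk, hpre, hmax⟩
      · left
        refine ⟨by simp [PySem.Chars.rfind.go, hp, hgo], ?_⟩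
        intro k hk
        by_cases hkj : k = j + 1
        · subst hkj; simpa [List.isPrefixOf_iff_prefix] using hp
        · exact hall k (by omega)
      · right
        refine ⟨k, by simp [PySem.Chars.rfind.go, hp, hgo], by omega, hpre, ?_⟩
        intro k' h1 h2
        by_cases hkj : k' = j + 1
        · subst hkj; simpa [List.isPrefixOf_iff_prefix] using hp
        · exact hmax k' h1 (by omega)


lemma selN_zero (cs : List Char) (h a : ℕ) : selN cs h a 0 = 0 := rfl

lemma selN_succ (cs : List Char) (h a k : ℕ) :
    selN cs h a (k+1) =
      if cs[h+a]? = some ' ' then ((h+a : ℕ) : Int)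
      else if cs[h-a]? = some ' ' then ((h-a : ℕ) : Int)
      else selN cs h (a+1) k := rfl

-- the A-loop value, computed from first-forward-space / last-backward-space data
-- the intended loop value as a function of the two candidates
def selTarget (fOpt bOpt : Option ℕ) (h : ℕ) : Int :=
  match fOpt, bOpt with
  | none, none => 0
  | some f, none => (f : Int)
  | none, some b => (b : Int)
  | some f, some b => if f - h ≤ h - b then (f : Int) else (b : Int)

lemma selN_full (cs : List Char) (h : ℕ) (hh : 5 ≤ h)
    (fOpt bOpt : Option ℕ)
    (hf : match fOpt with
          | none => ∀ j, h ≤ j → j ≤ 2*h-3 → cs[j]? ≠ some ' '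
          | some f => h ≤ f ∧ f ≤ 2*h-3 ∧ cs[f]? = some ' ' ∧
              ∀ i, h ≤ i → i < f → cs[i]? ≠ some ' ')
    (hb : match bOpt with
          | none => ∀ j, 3 ≤ j → j ≤ h → cs[j]? ≠ some ' '
          | some b => 3 ≤ b ∧ b ≤ h ∧ cs[b]? = some ' ' ∧
              ∀ j, b < j → j ≤ h → cs[j]? ≠ some ' ') :
    selN cs h 0 (h-2) = selTarget fOpt bOpt h := by
  rcases fOpt with _ | f <;> rcases bOpt with _ | b <;> simp only [selTarget]
  · -- no candidate at all: the loop runs to the end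
    have hskip := selN_skip cs h (h-2) 0 0
      (fun i hi1 hi2 => ⟨hf (h+i) (by omega) (by omega), hb (h-i) (by omega) (by omega)⟩)
    simpa [selN_zero] using hskip
  · -- only a backward candidate b
    obtain ⟨hb3, hbh, hPb, hbmax⟩ := hb
    have hm : h - 2 = (h - b) + ((h-2) - (h-b)) := by omega
    rw [hm, selN_skip cs h (h-b) ((h-2)-(h-b)) 0
      (fun i hi1 hi2 => ⟨hf (h+i) (by omega) (by omega), hbmax (h-i) (by omega) (by omega)⟩)]
    rw [show (h-2) - (h-b) = (b - 3) + 1 from by omega, selN_succ]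
    rw [if_neg (hf (h + (0 + (h-b))) (by omega) (by omega))]
    rw [show h - (0 + (h-b)) = b from by omega, if_pos hPb]
  · -- only a forward candidate f
    obtain ⟨hfh, hf3, hPf, hfmin⟩ := hf
    have hm : h - 2 = (f - h) + ((h-2) - (f-h)) := by omega
    rw [hm, selN_skip cs h (f-h) ((h-2)-(f-h)) 0
      (fun i hi1 hi2 => ⟨hfmin (h+i) (by omega) (by omega), hb (h-i) (by omega) (by omega)⟩)]
    rw [show (h-2) - (f-h) = ((h-2) - (f-h) - 1) + 1 from by omega, selN_succ]
    rw [show h + (0 + (f-h)) = f from by omega, if_pos hPf]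
  · obtain ⟨hfh, hf3, hPf, hfmin⟩ := hf
    obtain ⟨hb3, hbh, hPb, hbmax⟩ := hb
    by_cases hfb : f - h ≤ h - b
    · rw [if_pos hfb]
      have hm : h - 2 = (f - h) + ((h-2) - (f-h)) := by omega
      rw [hm, selN_skip cs h (f-h) ((h-2)-(f-h)) 0
        (fun i hi1 hi2 => ⟨hfmin (h+i) (by omega) (by omega), hbmax (h-i) (by omega) (by omega)⟩)]
      rw [show (h-2) - (f-h) = ((h-2) - (f-h) - 1) + 1 from by omega, selN_succ]
      rw [show h + (0 + (f-h)) = f from by omega, if_pos hPf]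
    · rw [if_neg hfb]
      have hm : h - 2 = (h - b) + ((h-2) - (h-b)) := by omega
      rw [hm, selN_skip cs h (h-b) ((h-2)-(h-b)) 0
        (fun i hi1 hi2 => ⟨hfmin (h+i) (by omega) (by omega), hbmax (h-i) (by omega) (by omega)⟩)]
      rw [show (h-2) - (h-b) = (b - 3) + 1 from by omega, selN_succ]
      rw [if_neg (hfmin (h + (0 + (h-b))) (by omega) (by omega))]
      rw [show h - (0 + (h-b)) = b from by omega, if_pos hPb]

-- ===== VERDICT (by name: the statement is the Claim_ definition above) =====
set_option maxHeartbeats 1000000 in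
theorem split_half_on_space_spec : Claim_equal_split_half_on_space := by
  intro string _
  unfold Spec_split_half_on_space
  by_cases hlt : PySem.Str.len string < 10
  · unfold split_half_on_space split_half_on_space_alt
    rw [if_pos hlt, if_pos hlt]
  · have hlen : PySem.Str.len string = (string.toList.length : Int) := by
      simp [pysem]
    set cs := string.toList with hcs
    set n := cs.length with hn
    have h10 : 10 ≤ n := by rw [hlen] at hlt; omega
    set h := n / 2 with hh
    have hh5 : 5 ≤ h := by omega
    have hhalf : PySem.Int.floordiv (PySem.Str.len string) 2 = (h : Int) := by
      rw [hlen]; exact_mod_cast PySem.Int.floordiv_natCast n 2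
    -- the A-loop reduces to selN
    have hrange : PySem.List.pyRange 0 ((h : Int) - 2) 1 = (List.range' 0 (h-2)).map Int.ofNat := by
      rw [show (h : Int) - 2 = ((h - 2 : ℕ) : Int) from by omega,
        PySem.List.pyRange_zero_natCast, List.range_eq_range']
      rfl
    have hloop : splitLoopA string ((h : Int)) (PySem.List.pyRange 0 ((h : Int) - 2) 1)
        = selN cs h 0 (h-2) := by
      rw [hrange]; exact loop_eq_selN string h (h-2) 0 (by omega)
    -- forward candidate
    have hfindb : PySem.Str.findFrom string " " ((h : Int)) = PySem.Chars.findFrom cs [' '] ((h : Int)) none := rfl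
    set F := PySem.Chars.findFrom cs [' '] ((h : Int)) none with hFdef
    -- backward candidate
    have hrfindb : PySem.Str.rfindFrom string " " 3 (some ((h : Int) + 1))
        = PySem.Chars.rfindFrom cs [' '] 3 (some ((h : Int) + 1)) := rfl
    set t : List Char := (cs.take (h+1)).drop 3 with htdef
    have hrfind : PySem.Chars.rfindFrom cs [' '] 3 (some ((h : Int) + 1))
        = (if PySem.Chars.rfind t [' '] = -1 then -1 else 3 + PySem.Chars.rfind t [' ']) := by
      have e1 : ¬((cs.length : Int) < (h : Int) + 1) := by omega
      have e2 : ¬((h : Int) + 1 < (0 : Int)) := by omega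
      have e3 : ¬((3 : Int) < (0 : Int)) := by omega
      have e4 : ¬((h : Int) + 1 < (3 : Int)) := by omega
      have e5 : ((h : Int) + 1).toNat = h + 1 := by omega
      have e6 : ((3 : Int)).toNat = 3 := rfl
      simp only [PySem.Chars.rfindFrom, e1, e2, e3, e4, e5, e6, if_false]
      rfl
    have htlen : t.length = h - 2 := by
      rw [htdef]; simp; omega
    have hbridge : ∀ k : ℕ, ([' '] <+: t.drop k) ↔ (3 + k ≤ h ∧ cs[3+k]? = some ' ') := by
      intro k
      rw [htdef, List.drop_drop, singleton_prefix_drop_iff]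
      rw [List.getElem?_take]
      constructor
      · intro hsome
        split_ifs at hsome with hklt
        exact ⟨by omega, hsome⟩
      · rintro ⟨hk1, hk2⟩
        rw [if_pos (show 3 + k < h + 1 from by omega)]
        exact hk2
    -- assemble
    simp only [split_half_on_space, split_half_on_space_alt, if_neg hlt, hhalf, hloop,
      hfindb, hrfindb, hrfind]
    -- case analysis on the forward search
    rcases eq_or_ne F (-1) with hFn | hFs
    · -- no space at or after the midpoint
      have hnofwd : ∀ j, h ≤ j → cs[j]? ≠ some ' ' := by
        have hinf := (PySem.Chars.findFrom_natCast_eq_neg_one_iff cs [' '] h (by omega)).mp (by exact_mod_cast hFn)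
        intro j hj hP
        apply hinf
        have hpre : [' '] <+: (cs.drop h).drop (j - h) := by
          rw [List.drop_drop, show h + (j - h) = j from by omega]
          exact (singleton_prefix_drop_iff cs ' ' j).mpr hP
        exact (PySem.Chars.isIn_iff_infix [' '] (cs.drop h)).mp
          ((PySem.Chars.exists_prefix_drop_iff_isIn [' '] (cs.drop h)).mp ⟨j - h, hpre⟩)
      rcases rfind_go_cases t [' '] t.length with ⟨hgo, hnone⟩ | ⟨k, hgo, hkle, hkpre, hkmax⟩
      · -- neither side has a space: both return (strip, "")
        have hnobwd : ∀ j, 3 ≤ j → j ≤ h → cs[j]? ≠ some ' ' := by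
          intro j hj1 hj2 hP
          exact hnone (j - 3) (by omega) ((hbridge (j-3)).mpr ⟨by omega, by rwa [show 3 + (j-3) = j from by omega]⟩)
        have hsel : selN cs h 0 (h-2) = 0 :=
          selN_full cs h hh5 none none (fun j hj _ => hnofwd j hj) hnobwd
        have hrf : PySem.Chars.rfind t [' '] = -1 := by
          rw [PySem.Chars.rfind]; exact hgo
        rw [hsel, hrf, hFn]
        split_ifs <;> first | (exfalso; omega) | rfl
      · -- backward candidate only
        obtain ⟨hk3, hPk⟩ := (hbridge k).mp hkpre
        have hkmax' : ∀ j, 3 + k < j → j ≤ h → cs[j]? ≠ some ' ' := by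
          intro j hj1 hj2 hP
          exact hkmax (j - 3) (by omega) (by omega)
            ((hbridge (j-3)).mpr ⟨by omega, by rwa [show 3 + (j-3) = j from by omega]⟩)
        have hsel : selN cs h 0 (h-2) = ((3 + k : ℕ) : Int) :=
          selN_full cs h hh5 none (some (3+k)) (fun j hj _ => hnofwd j hj)
            ⟨by omega, hk3, hPk, hkmax'⟩
        have hrf : PySem.Chars.rfind t [' '] = (k : Int) := by
          rw [PySem.Chars.rfind]; exact hgo
        rw [hsel, hrf, hFn]
        split_ifs <;> first | (exfalso; omega) | rfl
    · -- forward search found a space at index f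
      obtain ⟨hFge, hFpre, hFmin⟩ := PySem.Chars.findFrom_natCast_spec cs [' '] h (by omega) (by exact_mod_cast hFs)
      set f := F.toNat with hfdef
      have hFf : F = (f : Int) := by omega
      have hPf : cs[f]? = some ' ' := (singleton_prefix_drop_iff cs ' ' f).mp hFpre
      have hfh : h ≤ f := by omega
      have hfmin : ∀ i, h ≤ i → i < f → cs[i]? ≠ some ' ' := by
        intro i h1 h2 hP
        exact hFmin i h1 h2 ((singleton_prefix_drop_iff cs ' ' i).mpr hP)
      rcases rfind_go_cases t [' '] t.length with ⟨hgo, hnone⟩ | ⟨k, hgo, hkle, hkpre, hkmax⟩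
      · -- no backward candidate
        have hnobwd : ∀ j, 3 ≤ j → j ≤ h → cs[j]? ≠ some ' ' := by
          intro j hj1 hj2 hP
          exact hnone (j - 3) (by omega) ((hbridge (j-3)).mpr ⟨by omega, by rwa [show 3 + (j-3) = j from by omega]⟩)
        have hrf : PySem.Chars.rfind t [' '] = -1 := by
          rw [PySem.Chars.rfind]; exact hgo
        by_cases hcap : f ≤ 2*h - 3
        · have hsel : selN cs h 0 (h-2) = ((f : ℕ) : Int) :=
            selN_full cs h hh5 (some f) none ⟨hfh, hcap, hPf, hfmin⟩ hnobwd
          rw [hsel, hrf, hFf]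
          split_ifs <;> first | (exfalso; omega) | rfl
        · -- the forward space is past the window: no candidate at all
          have hnofwd' : ∀ j, h ≤ j → j ≤ 2*h-3 → cs[j]? ≠ some ' ' := by
            intro j hj1 hj2
            exact hfmin j hj1 (by omega)
          have hsel : selN cs h 0 (h-2) = 0 :=
            selN_full cs h hh5 none none hnofwd' hnobwd
          rw [hsel, hrf, hFf]
          split_ifs <;> first | (exfalso; omega) | rfl
      · -- both candidates
        obtain ⟨hk3, hPk⟩ := (hbridge k).mp hkpre
        have hkmax' : ∀ j, 3 + k < j → j ≤ h → cs[j]? ≠ some ' ' := by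
          intro j hj1 hj2 hP
          exact hkmax (j - 3) (by omega) (by omega)
            ((hbridge (j-3)).mpr ⟨by omega, by rwa [show 3 + (j-3) = j from by omega]⟩)
        have hrf : PySem.Chars.rfind t [' '] = (k : Int) := by
          rw [PySem.Chars.rfind]; exact hgo
        by_cases hcap : f ≤ 2*h - 3
        · have hsel : selN cs h 0 (h-2) =
              (if f - h ≤ h - (3+k) then ((f : ℕ) : Int) else ((3 + k : ℕ) : Int)) :=
            selN_full cs h hh5 (some f) (some (3+k)) ⟨hfh, hcap, hPf, hfmin⟩
              ⟨by omega, hk3, hPk, hkmax'⟩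
          rw [hsel, hrf, hFf]
          split_ifs <;> first | (exfalso; omega) | rfl
        · -- forward out of window: only the backward candidate counts
          have hnofwd' : ∀ j, h ≤ j → j ≤ 2*h-3 → cs[j]? ≠ some ' ' := by
            intro j hj1 hj2
            exact hfmin j hj1 (by omega)
          have hsel : selN cs h 0 (h-2) = ((3 + k : ℕ) : Int) :=
            selN_full cs h hh5 none (some (3+k)) hnofwd' ⟨by omega, hk3, hPk, hkmax'⟩
          rw [hsel, hrf, hFf]
          split_ifs <;> first | (exfalso; omega) | rfl
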